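-- pv_equiv track=rewrite | github.com/danila99/Edu | Coursera/2013 07 Coding the Matrix/1. Politics Lab/politics_lab.py | least_similar
-- ===== SOURCE A (Python) =====
-- def dict_compare(d1, d2):
--     assert len(d1) == len(d2)
--     return sum(d1[i] * d2[i] for i in range(len(d1)))
--
-- def policy_compare(sen_a, sen_b, voting_dict):
--     """
--     Input: last names of sen_a and sen_b, and a voting dictionary mapping senator
--            names to lists representing their voting records.
--     Output: the dot-product (as a number) representing the degree of similarity
--             between two senators' voting policies
--     Example:
--         >>> voting_dict = {'Fox-Epstein':[-1,-1,-1,1],'Ravella':[1,1,1,1]}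
--         >>> policy_compare('Fox-Epstein','Ravella', voting_dict)
--         -2
--     """
--     v_a = voting_dict[sen_a]
--     v_b = voting_dict[sen_b]
--     assert len(v_a) == len(v_b)
--
--     return dict_compare(v_a, v_b)
--
-- def least_similar(sen, voting_dict):
--     """
--     Input: the last name of a senator, and a dictionary mapping senator names
--            to lists representing their voting records.
--     Output: the last name of the senator whose political mindset is least like the input
--             senator.
--     Example:
--         >>> vd = {'Klein': [1,1,1], 'Fox-Epstein': [1,-1,0], 'Ravella': [-1,0,0]}
--         >>> least_similar('Klein', vd)
--         'Ravella'
--     """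
--     assert len(voting_dict) > 0
--
--     d = {sen_b:policy_compare(sen, sen_b, voting_dict) for sen_b in voting_dict.keys() if sen != sen_b}
--     min = None
--     sen_name = ''
--
--     for k in d.keys():
--         if min == None or d[k] < min:
--             min = d[k]
--             sen_name = k
--
--     return sen_name
-- ===== SOURCE B (Python) =====
-- def least_similar(sen, voting_dict):
--     va = voting_dict[sen]
--     scored = sorted(
--         ((sum(x * y for x, y in zip(va, v)), name)
--          for name, v in voting_dict.items() if name != sen),
--         key=lambda t: t[0])
--     return scored[0][1] if scored else ''
-- ===== Notes on version B (the rewrite author's own statement) =====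
-- stated objective: alternative
-- what changed: Instead of building a score dict and scanning it with a None-sentinel min loop, B stably sorts the (score, name) candidate pairs by score and returns the head's name (or '' when there is no candidate); stability reproduces A's first-strict-minimum tie-break.
-- outside the precondition, e.g. on least_similar('', {}): A raises AssertionError, B raises KeyError
import Mathlib
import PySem

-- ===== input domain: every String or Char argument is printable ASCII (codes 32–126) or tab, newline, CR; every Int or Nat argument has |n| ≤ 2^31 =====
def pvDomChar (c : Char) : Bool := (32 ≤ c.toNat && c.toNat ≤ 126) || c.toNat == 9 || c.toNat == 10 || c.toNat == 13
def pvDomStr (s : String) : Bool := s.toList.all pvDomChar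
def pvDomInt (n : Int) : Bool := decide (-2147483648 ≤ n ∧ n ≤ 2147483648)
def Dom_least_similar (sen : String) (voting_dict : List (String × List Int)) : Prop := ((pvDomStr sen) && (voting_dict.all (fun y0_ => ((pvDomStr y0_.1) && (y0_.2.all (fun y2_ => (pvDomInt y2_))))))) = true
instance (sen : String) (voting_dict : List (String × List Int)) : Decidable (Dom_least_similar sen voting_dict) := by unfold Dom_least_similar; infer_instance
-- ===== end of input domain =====

-- B replaces A's intermediate score dict and explicit min-loop by a stable sort of the
-- (score, name) candidate pairs followed by taking the head (objective: alternative).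


-- ===== PORT A =====
-- sum(d1[i] * d2[i] for i in range(len(d1)))  (the assert raises outside Pre_)
def pv_dict_compare (d1 d2 : List Int) : Int :=
  ((PySem.List.pyRange 0 (PySem.List.len d1) 1).map
    (fun i => PySem.List.pyGetD d1 i 0 * PySem.List.pyGetD d2 i 0)).sum

-- voting_dict[sen] : a KeyError (= Dict.get? none) is excluded by Pre_, so getD [] is exact there
def pv_policy_compare (sen_a sen_b : String) (voting_dict : List (String × List Int)) : Int :=
  pv_dict_compare (PySem.Dict.getD ⟨voting_dict⟩ sen_a [])
                  (PySem.Dict.getD ⟨voting_dict⟩ sen_b [])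

def least_similar (sen : String) (voting_dict : List (String × List Int)) : String :=
  -- d = {sen_b: policy_compare(sen, sen_b, voting_dict) for sen_b in voting_dict.keys() if sen != sen_b}
  let d : PySem.Dict String Int :=
    voting_dict.foldl
      (fun acc p => if sen ≠ p.1 then acc.insert p.1 (pv_policy_compare sen p.1 voting_dict) else acc)
      PySem.Dict.empty
  -- for k in d.keys(): if min == None or d[k] < min: …   (k ∈ d.keys, so d[k] = getD k 0 is exact)
  let r : Option Int × String :=
    (PySem.Dict.keys d).foldl
      (fun st k =>
        match st.1 with
        | none => (some (d.getD k 0), k)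
        | some m => if d.getD k 0 < m then (some (d.getD k 0), k) else st)
      (none, "")
  r.2

-- ===== PORT B =====
def least_similar_alt (sen : String) (voting_dict : List (String × List Int)) : String :=
  let va := PySem.Dict.getD ⟨voting_dict⟩ sen []   -- voting_dict[sen]; KeyError excluded by Pre_
  -- scored = sorted(((dot, name) for name, v in items if name != sen), key=lambda t: t[0])
  let scored := PySem.List.sorted
      ((voting_dict.filter (fun kv => decide (kv.1 ≠ sen))).map
        (fun kv => (((va.zip kv.2).map (fun xy => xy.1 * xy.2)).sum, kv.1)))
      (fun t => t.1)
  -- scored[0][1] if scored else ''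
  match scored with
  | [] => ""
  | t :: _ => t.2

-- ===== PRECONDITION & SPEC =====
-- A returns iff the dict is nonempty (assert), sen is a key (else KeyError) and every record
-- has sen's record length (else AssertionError). The Nodup conjunct does not narrow the Python
-- domain: a Python dict cannot hold duplicate keys, so a duplicate-key association list
-- corresponds to no Python input.
def Pre_least_similar (sen : String) (voting_dict : List (String × List Int)) : Prop :=
  voting_dict ≠ [] ∧ (voting_dict.map Prod.fst).Nodup ∧ sen ∈ voting_dict.map Prod.fst ∧
    ∀ p ∈ voting_dict, p.2.length = (PySem.Dict.getD ⟨voting_dict⟩ sen []).length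
instance (sen : String) (voting_dict : List (String × List Int)) : Decidable (Pre_least_similar sen voting_dict) := by unfold Pre_least_similar; infer_instance

def pvWitness_least_similar : String × (List (String × List Int)) :=
  ("Klein", [("Klein", [1, 1, 1]), ("Fox-Epstein", [1, -1, 0]), ("Ravella", [-1, 0, 0])])

def Spec_least_similar (sen : String) (voting_dict : List (String × List Int)) (out : String) : Prop := out = least_similar_alt sen voting_dict
instance (sen : String) (voting_dict : List (String × List Int)) (out : String) : Decidable (Spec_least_similar sen voting_dict out) := by unfold Spec_least_similar; infer_instance

-- ===== CLAIM (what is proved, stated in full; the proofs are below) =====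
def Claim_equal_least_similar : Prop := ∀ (sen : String) (voting_dict : List (String × List Int)), Dom_least_similar sen voting_dict → Pre_least_similar sen voting_dict → Spec_least_similar sen voting_dict (least_similar sen voting_dict)

-- ===== LEMMAS AND PROOFS =====

-- building A's dict d over fresh keys appends the filtered, scored pairs
theorem pv_build_items (sen : String) (g : String → Int) :
    ∀ (l : List (String × List Int)) (d : PySem.Dict String Int),
      (d.keys ++ l.map Prod.fst).Nodup →
      (l.foldl (fun acc p => if sen ≠ p.1 then acc.insert p.1 (g p.1) else acc) d).items
        = d.items ++ (l.filter (fun p => decide (sen ≠ p.1))).map (fun p => (p.1, g p.1)) := by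
  intro l
  induction l with
  | nil => intro d _; simp
  | cons p t ih =>
    intro d hnd
    have hfresh : p.1 ∉ d.keys := fun hmem =>
      (List.nodup_append.mp hnd).2.2 _ hmem _ (by simp) rfl
    have hcont : PySem.Dict.contains d p.1 = false := by
      rw [Bool.eq_false_iff]
      intro hc
      exact hfresh ((PySem.Dict.contains_iff_mem_keys d p.1).mp hc)
    by_cases hs : sen ≠ p.1
    · simp only [List.foldl_cons, if_pos hs]
      rw [ih]
      · rw [PySem.Dict.items_insert_of_not_contains _ _ hcont]
        simp [hs]
      · rw [PySem.Dict.keys_insert_of_not_contains _ _ hcont]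
        simpa [List.append_assoc] using hnd
    · simp only [List.foldl_cons, if_neg hs]
      rw [ih]
      · simp [hs]
      · refine List.Nodup.sublist ?_ hnd
        refine List.Sublist.append_left ?_ _
        simp

-- the index-summed dot product is the zip-summed one (past min-length, pyGetD's 0 kills each term)
theorem pv_dot_eq (a b : List Int) :
    pv_dict_compare a b = ((a.zip b).map (fun xy => xy.1 * xy.2)).sum := by
  unfold pv_dict_compare
  have key : ∀ (a b : List Int),
      ((List.range a.length).map (fun i => a.getD i 0 * b.getD i 0)).sum
        = ((a.zip b).map (fun xy => xy.1 * xy.2)).sum := by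
    intro a
    induction a with
    | nil => intro b; simp
    | cons x a' ih =>
      intro b
      cases b with
      | nil =>
        simp [List.range_succ_eq_map, List.map_map]
        exact List.sum_eq_zero (by simp [Function.comp_def])
      | cons y b' =>
        simp [List.range_succ_eq_map, List.map_map, Function.comp_def]
        simpa using ih b'
  have h1 : PySem.List.len a = ((a.length : Nat) : Int) := by simp [PySem.List.len]
  rw [h1, PySem.List.pyRange_zero_nat, List.map_map]
  simp only [Function.comp_def]
  have : ∀ i ∈ List.range a.length,
      (fun i : Nat => PySem.List.pyGetD a (i : Int) 0 * PySem.List.pyGetD b (i : Int) 0) i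
        = (fun i : Nat => a.getD i 0 * b.getD i 0) i := by
    intro i _; simp [PySem.List.pyGetD_natCast]
  rw [List.map_congr_left this, key]

-- A's min-loop started after the first candidate computes min? of the remaining pairs
theorem pv_loop_aux (l : List (String × Int)) :
    ∀ (m : String × Int),
      (l.foldl (fun (st : Option Int × String) kv =>
          match st.1 with
          | none => (some kv.2, kv.1)
          | some m => if kv.2 < m then (some kv.2, kv.1) else st) (some m.2, m.1))
        = match PySem.List.min? (m :: l) (fun p => p.2) with
          | none => ((none : Option Int), "")
          | some p => (some p.2, p.1) := by
  induction l with
  | nil => intro m; simp [PySem.List.min?]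
  | cons kv t ih =>
    intro m
    by_cases h : kv.2 < m.2
    · have h2 : PySem.List.min? (m :: kv :: t) (fun p => p.2)
          = PySem.List.min? (kv :: t) (fun p => p.2) := by
        simp [PySem.List.min?, h]
      rw [h2]
      simpa [h] using ih kv
    · have h2 : PySem.List.min? (m :: kv :: t) (fun p => p.2)
          = PySem.List.min? (m :: t) (fun p => p.2) := by
        simp [PySem.List.min?, h]
      rw [h2]
      simpa [h] using ih m

-- A's min-loop over (name, score) pairs is min? by the score, projected to the name
theorem pv_loop_eq_min? (l : List (String × Int)) :
    (l.foldl (fun (st : Option Int × String) kv =>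
        match st.1 with
        | none => (some kv.2, kv.1)
        | some m => if kv.2 < m then (some kv.2, kv.1) else st) (none, "")).2
      = match PySem.List.min? l (fun p => p.2) with
        | none => ""
        | some p => p.1 := by
  cases l with
  | nil => simp [PySem.List.min?]
  | cons m t =>
    rw [List.foldl_cons]
    refine Eq.trans (congrArg Prod.snd (pv_loop_aux t m)) ?_
    cases PySem.List.min? (m :: t) (fun p => p.2) <;> simp

-- min? of a mapped list is min? by the composed key, mapped
theorem pv_min?_map {α β κ : Type} [LT κ] [DecidableLT κ] (g : α → β) (key : β → κ)
    (l : List α) :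
    PySem.List.min? (l.map g) key = (PySem.List.min? l (fun x => key (g x))).map g := by
  simp only [PySem.List.min?, List.foldl_map]
  suffices h : ∀ (acc : Option α),
      l.foldl (fun acc x =>
          match acc with
          | none => some (g x)
          | some m => if key (g x) < key m then some (g x) else some m) (acc.map g)
        = (l.foldl (fun acc x =>
            match acc with
            | none => some x
            | some m => if key (g x) < key (g m) then some x else some m) acc).map g by
    simpa using h none
  induction l with
  | nil => intro acc; rfl
  | cons x t ih =>
    intro acc
    cases acc with
    | none => simpa using ih (some x)
    | some m =>
      by_cases h : key (g x) < key (g m)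
      · simpa [h] using ih (some x)
      · simpa [h] using ih (some m)

-- the head of an insertBy step is min?'s fold step on the old head
theorem pv_head_insertBy {α κ : Type} [LT κ] [DecidableLT κ] (key : α → κ) (x : α)
    (acc : List α) :
    (PySem.List.insertBy (fun a b => decide (key a < key b)) x acc).head?
      = match acc.head? with
        | none => some x
        | some m => if key x < key m then some x else some m := by
  cases acc with
  | nil => rfl
  | cons y ys =>
    by_cases h : key x < key y <;> simp [PySem.List.insertBy, h]

-- the head of the stable sort is the FIRST key-minimal element, i.e. min?
theorem pv_head_sorted_eq_min? {α κ : Type} [LT κ] [DecidableLT κ] (key : α → κ)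
    (l : List α) :
    (PySem.List.sorted l key).head? = PySem.List.min? l key := by
  rw [PySem.List.sorted_eq_foldl_insertBy]
  suffices h : ∀ (acc : List α),
      (l.foldl (fun acc x => PySem.List.insertBy (fun a b => decide (key a < key b)) x acc)
          acc).head?
        = l.foldl (fun st x =>
            match st with
            | none => some x
            | some m => if key x < key m then some x else some m) acc.head? by
    simpa [PySem.List.min?] using h []
  induction l with
  | nil => intro acc; rfl
  | cons x t ih =>
    intro acc
    rw [List.foldl_cons, List.foldl_cons, ih, pv_head_insertBy]

-- ===== VERDICT (by name: the statement is the Claim_ definition above) =====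
theorem least_similar_spec : Claim_equal_least_similar := by
  intro sen vd _ hpre
  obtain ⟨-, hnd, -, -⟩ := hpre
  show least_similar sen vd = least_similar_alt sen vd
  unfold least_similar least_similar_alt
  simp only []
  -- A's dict d, as an items list
  have hitems := pv_build_items sen (fun k => pv_policy_compare sen k vd) vd PySem.Dict.empty
    (by simpa [PySem.Dict.keys] using hnd)
  simp only [PySem.Dict.empty, List.nil_append] at hitems
  have hd : (vd.foldl
      (fun acc p => if sen ≠ p.1 then acc.insert p.1 (pv_policy_compare sen p.1 vd) else acc)
      PySem.Dict.empty)
      = PySem.Dict.mk ((vd.filter (fun p => decide (sen ≠ p.1))).map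
          (fun p => (p.1, pv_policy_compare sen p.1 vd))) := congrArg PySem.Dict.mk hitems
  rw [hd]
  -- keys nodup of d
  have hkeysd : ((PySem.Dict.mk ((vd.filter (fun p => decide (sen ≠ p.1))).map
      (fun p => (p.1, pv_policy_compare sen p.1 vd)))).keys).Nodup := by
    simp only [PySem.Dict.keys, List.map_map, Function.comp_def]
    exact hnd.sublist (List.filter_sublist.map _)
  -- the loop over d.keys, looking values up, is the loop over d.items on the pair
  rw [show (PySem.Dict.mk ((vd.filter (fun p => decide (sen ≠ p.1))).map
      (fun p => (p.1, pv_policy_compare sen p.1 vd)))).keys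
    = ((vd.filter (fun p => decide (sen ≠ p.1))).map
      (fun p => (p.1, pv_policy_compare sen p.1 vd))).map Prod.fst from rfl]
  rw [List.foldl_map]
  have hget : ∀ kv ∈ ((vd.filter (fun p => decide (sen ≠ p.1))).map
      (fun p => (p.1, pv_policy_compare sen p.1 vd))),
      (PySem.Dict.mk ((vd.filter (fun p => decide (sen ≠ p.1))).map
        (fun p => (p.1, pv_policy_compare sen p.1 vd)))).getD kv.1 0 = kv.2 := by
    intro kv hkv
    exact PySem.Dict.getD_of_mem_items _ (by simpa using hkv) hkeysd 0
  rw [PySem.List.foldl_congr_mem _ _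
      (fun (st : Option Int × String) kv =>
        match st.1 with
        | none => (some kv.2, kv.1)
        | some m => if kv.2 < m then (some kv.2, kv.1) else st) _
      (by intro acc kv hkv; rw [hget kv hkv])]
  rw [pv_loop_eq_min?]
  -- A's pair list is B's scored list with the components swapped
  have hLp : ((vd.filter (fun p => decide (sen ≠ p.1))).map
      (fun p => (p.1, pv_policy_compare sen p.1 vd)))
      = ((vd.filter (fun kv => decide (kv.1 ≠ sen))).map
          (fun kv => ((((PySem.Dict.getD ⟨vd⟩ sen []).zip kv.2).map
            (fun xy => xy.1 * xy.2)).sum, kv.1))).map (fun t => (t.2, t.1)) := by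
    rw [List.filter_congr (fun x _ => decide_eq_decide.mpr (ne_comm (a := sen) (b := x.1)))]
    rw [List.map_map]
    refine List.map_congr_left ?_
    intro p hp
    have hpvd : p ∈ vd := List.mem_of_mem_filter hp
    have hval : PySem.Dict.getD (⟨vd⟩ : PySem.Dict String (List Int)) p.1 [] = p.2 :=
      PySem.Dict.getD_of_mem_items _ (by simpa using hpvd)
        (by simpa [PySem.Dict.keys] using hnd) []
    unfold pv_policy_compare
    rw [hval, pv_dot_eq]
    rfl
  rw [hLp, pv_min?_map]
  -- B's head-of-sorted is min? of the scored list
  have hB := pv_head_sorted_eq_min? (fun t : Int × String => t.1)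
    ((vd.filter (fun kv => decide (kv.1 ≠ sen))).map
      (fun kv => ((((PySem.Dict.getD ⟨vd⟩ sen []).zip kv.2).map
        (fun xy => xy.1 * xy.2)).sum, kv.1)))
  cases hs : PySem.List.sorted
      ((vd.filter (fun kv => decide (kv.1 ≠ sen))).map
        (fun kv => ((((PySem.Dict.getD ⟨vd⟩ sen []).zip kv.2).map
          (fun xy => xy.1 * xy.2)).sum, kv.1))) (fun t => t.1) with
  | nil =>
    rw [hs] at hB
    simp only [List.head?_nil] at hB
    rw [← hB]
    rfl
  | cons t ts =>
    rw [hs] at hB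
    simp only [List.head?_cons] at hB
    rw [← hB]
    rfl
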